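-- pv_equiv track=rewrite | github.com/radimspetlik/identity_verification_from_human_scent | channels_representation/help_functions.py | from_times_pixels
-- ===== SOURCE A (Python) =====
-- def from_times_pixels(compounds: dict, system_number, x_six_seconds, y_six_seconds, x_eight_seconds, y_eight_seconds,
--                       x_ten_seconds, y_ten_seconds, t1_shift=0, t1_offset=0, t2_offset=0):
--     compounds_pixels = {}
--     if system_number == 1:
--         min_ten_seconds = x_six_seconds * 6 + x_eight_seconds * 6
--         for compound in compounds:
--             t1 = compounds[compound]['t1'] + t1_offset + t1_shift
--             t2 = compounds[compound]['t2'] + t2_offset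
--             t2 *= 1000
--             t2_pixels = t2 // 5
--             if t1 < min_ten_seconds:
--                 t1_pixels = t1 // 6
--             else:
--                 t1 = t1 - min_ten_seconds
--                 t1_pixels = (x_six_seconds + x_eight_seconds) + t1 // 10
--             t2_pixels = int(t2_pixels)
--             t1_pixels = int(t1_pixels)
--             compounds_pixels[compound] = (t1_pixels, t2_pixels)
--     elif system_number == -1:
--         min_ten_seconds = x_eight_seconds * 8
--         for compound in compounds:
--             t1 = compounds[compound]['t1'] + t1_offset + t1_shift
--             t2 = compounds[compound]['t2'] + t2_offset
--             t2 *= 1000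
--             t2_pixels = t2 // 5
--             if t1 < min_ten_seconds:
--                 t1_pixels = t1 // 8
--             else:
--                 t1 = t1 - min_ten_seconds
--                 t1_pixels = x_eight_seconds + t1 // 10
--             t2_pixels = int(t2_pixels)
--             t1_pixels = int(t1_pixels)
--             compounds_pixels[compound] = (t1_pixels, t2_pixels)
--     else:
--         min_ten_seconds = x_six_seconds * 6 + x_eight_seconds * 8
--         min_eight_seconds = x_six_seconds * 6
--         for compound in compounds:
--             t1 = compounds[compound]['t1'] + t1_offset + t1_shift
--             t2 = compounds[compound]['t2'] + t2_offset
--             t2 *= 1000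
--             t2_pixels = t2 // 5
--             if t1 < min_eight_seconds:
--                 t1_pixels = t1 // 6
--             elif t1 < min_ten_seconds:
--                 t1 = t1 - min_eight_seconds
--                 t1_pixels = x_six_seconds + t1 // 8
--             else:
--                 t1 = t1 - min_ten_seconds
--                 t1_pixels = (x_six_seconds + x_eight_seconds) + t1 // 10
--             t2_pixels = int(t2_pixels)
--             t1_pixels = int(t1_pixels)
--             compounds_pixels[compound] = (t1_pixels, t2_pixels)
--     return compounds_pixels
-- ===== SOURCE B (Python) =====
-- def from_times_pixels(compounds: dict, system_number, x_six_seconds, y_six_seconds, x_eight_seconds, y_eight_seconds,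
--                       x_ten_seconds, y_ten_seconds, t1_shift=0, t1_offset=0, t2_offset=0):
--     # Model the elution ramp as a list of (pixel_width, seconds_per_pixel) zones, ending in
--     # an open-ended 10-seconds-per-pixel zone; t1 is mapped by CONSUMING it zone by zone
--     # (subtract the zone's duration, accumulate its pixel width) instead of comparing
--     # against absolute thresholds.
--     if system_number == 1:
--         ramp = [(x_six_seconds + x_eight_seconds, 6)]
--     elif system_number == -1:
--         ramp = [(x_eight_seconds, 8)]
--     else:
--         ramp = [(x_six_seconds, 6), (x_eight_seconds, 8)]
--
--     def t1_to_pixels(t1):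
--         pixels = 0
--         for width, seconds in ramp:
--             if t1 < width * seconds:
--                 return int(pixels + t1 // seconds)
--             t1 -= width * seconds
--             pixels += width
--         return int(pixels + t1 // 10)
--
--     return {name: (t1_to_pixels(times['t1'] + t1_offset + t1_shift),
--                    int(((times['t2'] + t2_offset) * 1000) // 5))
--             for name, times in compounds.items()}
-- ===== Notes on version B (the rewrite author's own statement) =====
-- stated objective: alternative
-- what changed: Replaces the three copied per-system threshold branch chains with a ramp of (pixel_width, seconds_per_pixel) zones that t1 is consumed through zone by zone (subtract zone duration, accumulate pixel width), and builds the result as a single dict comprehension instead of three fold-with-insert loops.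
import Mathlib
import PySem

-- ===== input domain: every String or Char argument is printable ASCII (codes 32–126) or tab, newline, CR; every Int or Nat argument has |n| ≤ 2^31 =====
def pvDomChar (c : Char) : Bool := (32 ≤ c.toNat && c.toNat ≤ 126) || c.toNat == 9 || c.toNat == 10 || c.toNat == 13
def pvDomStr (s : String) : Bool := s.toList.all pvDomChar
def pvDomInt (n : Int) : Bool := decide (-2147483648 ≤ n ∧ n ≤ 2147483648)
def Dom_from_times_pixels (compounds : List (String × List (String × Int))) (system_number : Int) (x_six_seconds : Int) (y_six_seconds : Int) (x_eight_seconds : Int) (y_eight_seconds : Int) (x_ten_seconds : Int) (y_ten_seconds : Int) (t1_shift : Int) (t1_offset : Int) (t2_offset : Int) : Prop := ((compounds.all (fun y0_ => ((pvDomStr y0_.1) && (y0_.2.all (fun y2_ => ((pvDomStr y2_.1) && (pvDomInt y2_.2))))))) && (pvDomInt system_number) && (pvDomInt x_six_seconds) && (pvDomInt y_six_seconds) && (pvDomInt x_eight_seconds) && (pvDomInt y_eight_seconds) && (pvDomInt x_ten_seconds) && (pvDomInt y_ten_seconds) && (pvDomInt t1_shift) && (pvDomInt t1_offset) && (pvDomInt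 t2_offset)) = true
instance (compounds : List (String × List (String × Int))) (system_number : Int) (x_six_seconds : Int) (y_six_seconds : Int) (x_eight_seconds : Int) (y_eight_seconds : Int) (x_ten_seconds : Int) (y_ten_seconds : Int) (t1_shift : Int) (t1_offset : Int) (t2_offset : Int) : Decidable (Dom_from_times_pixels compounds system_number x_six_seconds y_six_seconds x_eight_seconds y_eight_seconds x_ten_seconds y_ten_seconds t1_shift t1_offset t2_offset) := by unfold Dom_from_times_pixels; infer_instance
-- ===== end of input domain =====

-- B replaces A's three per-system absolute-threshold branch chains by a ramp of
-- (pixel_width, seconds_per_pixel) zones that t1 is consumed through, and one shared loop.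

-- ===== PORT A =====
-- Port of A: three per-system loops, each building the result dict with insert.
def from_times_pixels (compounds : List (String × List (String × Int))) (system_number : Int) (x_six_seconds : Int) (y_six_seconds : Int) (x_eight_seconds : Int) (y_eight_seconds : Int) (x_ten_seconds : Int) (y_ten_seconds : Int) (t1_shift : Int) (t1_offset : Int) (t2_offset : Int) : List (String × Int × Int) :=
  if system_number = 1 then
    let min_ten_seconds := x_six_seconds * 6 + x_eight_seconds * 6
    (compounds.foldl (fun (acc : PySem.Dict String (Int × Int)) c =>
      let t1 := (PySem.Dict.mk c.2).getD "t1" 0 + t1_offset + t1_shift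
      let t2 := ((PySem.Dict.mk c.2).getD "t2" 0 + t2_offset) * 1000
      let t2_pixels := PySem.Int.floordiv t2 5
      let t1_pixels :=
        if t1 < min_ten_seconds then PySem.Int.floordiv t1 6
        else (x_six_seconds + x_eight_seconds) + PySem.Int.floordiv (t1 - min_ten_seconds) 10
      acc.insert c.1 (t1_pixels, t2_pixels)) PySem.Dict.empty).items
  else if system_number = -1 then
    let min_ten_seconds := x_eight_seconds * 8
    (compounds.foldl (fun (acc : PySem.Dict String (Int × Int)) c =>
      let t1 := (PySem.Dict.mk c.2).getD "t1" 0 + t1_offset + t1_shift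
      let t2 := ((PySem.Dict.mk c.2).getD "t2" 0 + t2_offset) * 1000
      let t2_pixels := PySem.Int.floordiv t2 5
      let t1_pixels :=
        if t1 < min_ten_seconds then PySem.Int.floordiv t1 8
        else x_eight_seconds + PySem.Int.floordiv (t1 - min_ten_seconds) 10
      acc.insert c.1 (t1_pixels, t2_pixels)) PySem.Dict.empty).items
  else
    let min_ten_seconds := x_six_seconds * 6 + x_eight_seconds * 8
    let min_eight_seconds := x_six_seconds * 6
    (compounds.foldl (fun (acc : PySem.Dict String (Int × Int)) c =>
      let t1 := (PySem.Dict.mk c.2).getD "t1" 0 + t1_offset + t1_shift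
      let t2 := ((PySem.Dict.mk c.2).getD "t2" 0 + t2_offset) * 1000
      let t2_pixels := PySem.Int.floordiv t2 5
      let t1_pixels :=
        if t1 < min_eight_seconds then PySem.Int.floordiv t1 6
        else if t1 < min_ten_seconds then x_six_seconds + PySem.Int.floordiv (t1 - min_eight_seconds) 8
        else (x_six_seconds + x_eight_seconds) + PySem.Int.floordiv (t1 - min_ten_seconds) 10
      acc.insert c.1 (t1_pixels, t2_pixels)) PySem.Dict.empty).items

-- ===== PORT B =====
-- Port of B: per-system ramp of (pixel_width, seconds_per_pixel) zones, ending in an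
-- open-ended 10-seconds-per-pixel zone; t1 is consumed through the zones.
def pvRamp (system_number x_six_seconds x_eight_seconds : Int) : List (Int × Int) :=
  if system_number = 1 then [(x_six_seconds + x_eight_seconds, 6)]
  else if system_number = -1 then [(x_eight_seconds, 8)]
  else [(x_six_seconds, 6), (x_eight_seconds, 8)]

def pvT1ToPixels (t1 pixels : Int) : List (Int × Int) → Int
  | [] => pixels + PySem.Int.floordiv t1 10
  | (width, seconds) :: rest =>
    if t1 < width * seconds then pixels + PySem.Int.floordiv t1 seconds
    else pvT1ToPixels (t1 - width * seconds) (pixels + width) rest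

def from_times_pixels_alt (compounds : List (String × List (String × Int))) (system_number : Int) (x_six_seconds : Int) (y_six_seconds : Int) (x_eight_seconds : Int) (y_eight_seconds : Int) (x_ten_seconds : Int) (y_ten_seconds : Int) (t1_shift : Int) (t1_offset : Int) (t2_offset : Int) : List (String × Int × Int) :=
  let ramp := pvRamp system_number x_six_seconds x_eight_seconds
  (compounds.foldl (fun (acc : PySem.Dict String (Int × Int)) c =>
    acc.insert c.1
      (pvT1ToPixels ((PySem.Dict.mk c.2).getD "t1" 0 + t1_offset + t1_shift) 0 ramp,
       PySem.Int.floordiv (((PySem.Dict.mk c.2).getD "t2" 0 + t2_offset) * 1000) 5))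
    PySem.Dict.empty).items

-- ===== PRECONDITION & SPEC =====
-- Pre_ excludes assoc lists with duplicate outer or inner keys (unrepresentable as the Python
-- dicts A receives, on which lookup/iteration order of the list form is ambiguous) and inner
-- dicts missing the "t1" or "t2" key, on which A raises KeyError.
def Pre_from_times_pixels (compounds : List (String × List (String × Int))) (system_number : Int) (x_six_seconds : Int) (y_six_seconds : Int) (x_eight_seconds : Int) (y_eight_seconds : Int) (x_ten_seconds : Int) (y_ten_seconds : Int) (t1_shift : Int) (t1_offset : Int) (t2_offset : Int) : Prop :=
  (compounds.map Prod.fst).Nodup ∧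
  ∀ p ∈ compounds, (p.2.map Prod.fst).Nodup ∧
    ((PySem.Dict.mk p.2).get? "t1").isSome ∧ ((PySem.Dict.mk p.2).get? "t2").isSome
instance (compounds : List (String × List (String × Int))) (system_number : Int) (x_six_seconds : Int) (y_six_seconds : Int) (x_eight_seconds : Int) (y_eight_seconds : Int) (x_ten_seconds : Int) (y_ten_seconds : Int) (t1_shift : Int) (t1_offset : Int) (t2_offset : Int) : Decidable (Pre_from_times_pixels compounds system_number x_six_seconds y_six_seconds x_eight_seconds y_eight_seconds x_ten_seconds y_ten_seconds t1_shift t1_offset t2_offset) := by unfold Pre_from_times_pixels; infer_instance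

def pvWitness_from_times_pixels : (List (String × List (String × Int))) × Int × Int × Int × Int × Int × Int × Int × Int × Int × Int :=
  ([("a", [("t1", 10), ("t2", 2)]), ("b", [("t1", 40), ("t2", 3)])], 0, 3, 3, 3, 3, 3, 3, 1, 0, 0)

def Spec_from_times_pixels (compounds : List (String × List (String × Int))) (system_number : Int) (x_six_seconds : Int) (y_six_seconds : Int) (x_eight_seconds : Int) (y_eight_seconds : Int) (x_ten_seconds : Int) (y_ten_seconds : Int) (t1_shift : Int) (t1_offset : Int) (t2_offset : Int) (out : List (String × Int × Int)) : Prop := out = from_times_pixels_alt compounds system_number x_six_seconds y_six_seconds x_eight_seconds y_eight_seconds x_ten_seconds y_ten_seconds t1_shift t1_offset t2_offset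
instance (compounds : List (String × List (String × Int))) (system_number : Int) (x_six_seconds : Int) (y_six_seconds : Int) (x_eight_seconds : Int) (y_eight_seconds : Int) (x_ten_seconds : Int) (y_ten_seconds : Int) (t1_shift : Int) (t1_offset : Int) (t2_offset : Int) (out : List (String × Int × Int)) : Decidable (Spec_from_times_pixels compounds system_number x_six_seconds y_six_seconds x_eight_seconds y_eight_seconds x_ten_seconds y_ten_seconds t1_shift t1_offset t2_offset out) := by unfold Spec_from_times_pixels; infer_instance

-- ===== CLAIM (what is proved, stated in full; the proofs are below) =====
def Claim_equal_from_times_pixels : Prop := ∀ (compounds : List (String × List (String × Int))) (system_number : Int) (x_six_seconds : Int) (y_six_seconds : Int) (x_eight_seconds : Int) (y_eight_seconds : Int) (x_ten_seconds : Int) (y_ten_seconds : Int) (t1_shift : Int) (t1_offset : Int) (t2_offset : Int), Dom_from_times_pixels compounds system_number x_six_seconds y_six_seconds x_eight_seconds y_eight_seconds x_ten_seconds y_ten_seconds t1_shift t1_offset t2_offset → Pre_from_times_pixels compounds system_number x_six_seconds y_six_seconds x_eight_seconds y_eight_seconds x_ten_seconds y_ten_seconds t1_shift t1_offset t2_offset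 → Spec_from_times_pixels compounds system_number x_six_seconds y_six_seconds x_eight_seconds y_eight_seconds x_ten_seconds y_ten_seconds t1_shift t1_offset t2_offset (from_times_pixels compounds system_number x_six_seconds y_six_seconds x_eight_seconds y_eight_seconds x_ten_seconds y_ten_seconds t1_shift t1_offset t2_offset)

-- ===== LEMMAS AND PROOFS =====
theorem pvWitness_ok : Dom_from_times_pixels (pvWitness_from_times_pixels.1) (pvWitness_from_times_pixels.2.1) (pvWitness_from_times_pixels.2.2.1) (pvWitness_from_times_pixels.2.2.2.1) (pvWitness_from_times_pixels.2.2.2.2.1) (pvWitness_from_times_pixels.2.2.2.2.2.1) (pvWitness_from_times_pixels.2.2.2.2.2.2.1) (pvWitness_from_times_pixels.2.2.2.2.2.2.2.1) (pvWitness_from_times_pixels.2.2.2.2.2.2.2.2.1) (pvWitness_from_times_pixels.2.2.2.2.2.2.2.2.2.1) (pvWitness_from_times_pixels.2.2.2.2.2.2.2.2.2.2) ∧ Pre_from_times_pixels (pvWitness_from_times_pixels.1) (pvWitness_from_times_pixels.2.1) (pvWitness_from_times_pixels.2.2.1) (pvWitness_from_times_pixels.2.2.2.1) (pvWitness_from_times_pixels.2.2.2.2.1)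 (pvWitness_from_times_pixels.2.2.2.2.2.1) (pvWitness_from_times_pixels.2.2.2.2.2.2.1) (pvWitness_from_times_pixels.2.2.2.2.2.2.2.1) (pvWitness_from_times_pixels.2.2.2.2.2.2.2.2.1) (pvWitness_from_times_pixels.2.2.2.2.2.2.2.2.2.1) (pvWitness_from_times_pixels.2.2.2.2.2.2.2.2.2.2) := by decide

-- ===== VERDICT (by name: the statement is the Claim_ definition above) =====
theorem from_times_pixels_spec : Claim_equal_from_times_pixels := by
  intro compounds system_number x6 y6 x8 y8 x10 y10 t1_shift t1_offset t2_offset _ _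
  unfold Spec_from_times_pixels from_times_pixels from_times_pixels_alt pvRamp
  by_cases h1 : system_number = 1
  · simp only [h1, reduceIte]
    congr 1; congr 1
    funext acc c
    simp only [pvT1ToPixels]
    have hb : (x6 + x8) * 6 = x6 * 6 + x8 * 6 := by ring
    rw [hb]
    split_ifs <;> simp [Int.add_comm]
  · by_cases h2 : system_number = -1
    · simp only [h1, h2, Int.reduceNeg, Int.reduceEq, reduceIte]
      congr 1; congr 1
      funext acc c
      simp only [pvT1ToPixels]
      split_ifs <;> simp [Int.add_comm]
    · simp only [if_neg h1, if_neg h2]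
      congr 1; congr 1
      funext acc c
      simp only [pvT1ToPixels]
      split_ifs with hA hB hC
      · simp [Int.add_comm]
      · simp [Int.add_comm]
      · exfalso; omega
      · exfalso; omega
      · simp [Int.sub_sub, Int.add_comm]
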